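-- pv_equiv track=rewrite | github.com/yuxuan53/zeus | scripts/topology_doctor_closeout.py | selected_lanes
-- ===== SOURCE A (Python) =====
-- from typing import Any
--
-- def changed_files_touch(changed_files: list[str], patterns: tuple[str, ...]) -> bool:
--     return any(path.startswith(pattern) for path in changed_files for pattern in patterns)
--
-- def selected_lanes(api: Any, changed_files: list[str]) -> dict[str, Any]:
--     docs_related = (
--         changed_files_touch(changed_files, ("docs/",))
--         or any(
--             path in changed_files
--             for path in (
--                 "AGENTS.md",
--                 "workspace_map.md",
--                 "architecture/topology.yaml",
--                 "architecture/artifact_lifecycle.yaml",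
--                 "architecture/map_maintenance.yaml",
--                 "architecture/change_receipt_schema.yaml",
--                 "architecture/context_budget.yaml",
--             )
--         )
--     )
--     source_related = changed_files_touch(changed_files, ("src/",)) or "architecture/source_rationale.yaml" in changed_files
--     tests_related = changed_files_touch(changed_files, ("tests/",)) or any(
--         path in changed_files for path in ("architecture/test_topology.yaml", "pytest.ini")
--     )
--     scripts_related = changed_files_touch(changed_files, ("scripts/",)) or "architecture/script_manifest.yaml" in changed_files
--     data_rebuild_related = any(
--         path in changed_files
--         for path in (
--             "architecture/data_rebuild_topology.yaml",
--             "scripts/rebuild_calibration_pairs_canonical.py",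
--             "scripts/rebuild_settlements.py",
--             "scripts/refit_platt.py",
--         )
--     )
--     context_budget_related = docs_related or any(
--         path in changed_files
--         for path in (
--             "architecture/context_budget.yaml",
--             "docs/README.md",
--             "docs/AGENTS.md",
--         )
--     )
--     return {
--         "docs": docs_related,
--         "source": source_related,
--         "tests": tests_related,
--         "scripts": scripts_related,
--         "data_rebuild": data_rebuild_related,
--         "context_budget": context_budget_related,
--     }
-- ===== SOURCE B (Python) =====
-- def selected_lanes(api, changed_files):
--     docs = source = tests = scripts = data_rebuild = False
--     docs_names = (
--         "AGENTS.md",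
--         "workspace_map.md",
--         "architecture/topology.yaml",
--         "architecture/artifact_lifecycle.yaml",
--         "architecture/map_maintenance.yaml",
--         "architecture/change_receipt_schema.yaml",
--         "architecture/context_budget.yaml",
--     )
--     data_names = (
--         "architecture/data_rebuild_topology.yaml",
--         "scripts/rebuild_calibration_pairs_canonical.py",
--         "scripts/rebuild_settlements.py",
--         "scripts/refit_platt.py",
--     )
--     for path in changed_files:
--         if path.startswith("docs/") or path in docs_names:
--             docs = True
--         if path.startswith("src/") or path == "architecture/source_rationale.yaml":
--             source = True
--         if path.startswith("tests/") or path in ("architecture/test_topology.yaml", "pytest.ini"):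
--             tests = True
--         if path.startswith("scripts/") or path == "architecture/script_manifest.yaml":
--             scripts = True
--         if path in data_names:
--             data_rebuild = True
--     # context_budget's extra names ("architecture/context_budget.yaml", "docs/README.md",
--     # "docs/AGENTS.md") are all already covered by the docs lane, so it equals docs.
--     return {
--         "docs": docs,
--         "source": source,
--         "tests": tests,
--         "scripts": scripts,
--         "data_rebuild": data_rebuild,
--         "context_budget": docs,
--     }
-- ===== Notes on version B (the rewrite author's own statement) =====
-- stated objective: alternative
-- what changed: Replaces the six per-category scans of changed_files (each an any()/membership pass) by a single loop over changed_files that classifies each path once and sets boolean flags, with context_budget derived as equal to docs since its extra names are subsumed by the docs lane.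
import Mathlib
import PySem

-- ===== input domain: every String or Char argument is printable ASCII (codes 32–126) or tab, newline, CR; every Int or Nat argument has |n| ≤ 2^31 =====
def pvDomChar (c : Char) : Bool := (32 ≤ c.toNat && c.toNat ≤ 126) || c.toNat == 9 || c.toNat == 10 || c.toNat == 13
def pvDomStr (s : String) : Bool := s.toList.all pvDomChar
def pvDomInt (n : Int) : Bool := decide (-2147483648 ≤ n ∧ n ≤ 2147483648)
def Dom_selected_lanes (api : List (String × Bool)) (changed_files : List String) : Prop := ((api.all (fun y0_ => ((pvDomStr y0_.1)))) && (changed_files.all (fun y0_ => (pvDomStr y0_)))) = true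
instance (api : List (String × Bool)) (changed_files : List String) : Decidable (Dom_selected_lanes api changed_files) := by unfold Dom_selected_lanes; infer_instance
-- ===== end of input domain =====

-- B replaces A's six per-category scans by one classifying pass over changed_files
-- (context_budget coincides with docs, proved below); same cost class, different decomposition.

-- ===== PORT A =====
def changed_files_touch (changed_files : List String) (patterns : List String) : Bool :=
  changed_files.any (fun path => patterns.any (fun pattern => PySem.Str.startswith path pattern))

def selected_lanes (api : List (String × Bool)) (changed_files : List String) : List (String × Bool) :=
  let docs_related :=
    changed_files_touch changed_files ["docs/"]
    || (["AGENTS.md", "workspace_map.md", "architecture/topology.yaml",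
         "architecture/artifact_lifecycle.yaml", "architecture/map_maintenance.yaml",
         "architecture/change_receipt_schema.yaml", "architecture/context_budget.yaml"].any
          (fun path => changed_files.contains path))
  let source_related :=
    changed_files_touch changed_files ["src/"] || changed_files.contains "architecture/source_rationale.yaml"
  let tests_related :=
    changed_files_touch changed_files ["tests/"]
    || (["architecture/test_topology.yaml", "pytest.ini"].any (fun path => changed_files.contains path))
  let scripts_related :=
    changed_files_touch changed_files ["scripts/"] || changed_files.contains "architecture/script_manifest.yaml"
  let data_rebuild_related :=
    ["architecture/data_rebuild_topology.yaml", "scripts/rebuild_calibration_pairs_canonical.py",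
     "scripts/rebuild_settlements.py", "scripts/refit_platt.py"].any
      (fun path => changed_files.contains path)
  let context_budget_related :=
    docs_related
    || (["architecture/context_budget.yaml", "docs/README.md", "docs/AGENTS.md"].any
         (fun path => changed_files.contains path))
  [("docs", docs_related), ("source", source_related), ("tests", tests_related),
   ("scripts", scripts_related), ("data_rebuild", data_rebuild_related),
   ("context_budget", context_budget_related)]

-- ===== PORT B =====
def pvDocsNames : List String :=
  ["AGENTS.md", "workspace_map.md", "architecture/topology.yaml",
   "architecture/artifact_lifecycle.yaml", "architecture/map_maintenance.yaml",
   "architecture/change_receipt_schema.yaml", "architecture/context_budget.yaml"]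

def pvDataNames : List String :=
  ["architecture/data_rebuild_topology.yaml", "scripts/rebuild_calibration_pairs_canonical.py",
   "scripts/rebuild_settlements.py", "scripts/refit_platt.py"]

def pvAltStep (flags : Bool × Bool × Bool × Bool × Bool) (path : String) :
    Bool × Bool × Bool × Bool × Bool :=
  let ⟨docs, source, tests, scripts, data_rebuild⟩ := flags
  ( docs || (PySem.Str.startswith path "docs/" || pvDocsNames.contains path),
    source || (PySem.Str.startswith path "src/" || path == "architecture/source_rationale.yaml"),
    tests || (PySem.Str.startswith path "tests/" || ["architecture/test_topology.yaml", "pytest.ini"].contains path),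
    scripts || (PySem.Str.startswith path "scripts/" || path == "architecture/script_manifest.yaml"),
    data_rebuild || pvDataNames.contains path )

def selected_lanes_alt (api : List (String × Bool)) (changed_files : List String) : List (String × Bool) :=
  let f := changed_files.foldl pvAltStep (false, false, false, false, false)
  [("docs", f.1), ("source", f.2.1), ("tests", f.2.2.1),
   ("scripts", f.2.2.2.1), ("data_rebuild", f.2.2.2.2),
   ("context_budget", f.1)]

-- ===== PRECONDITION & SPEC =====
def Spec_selected_lanes (api : List (String × Bool)) (changed_files : List String) (out : List (String × Bool)) : Prop := out = selected_lanes_alt api changed_files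
instance (api : List (String × Bool)) (changed_files : List String) (out : List (String × Bool)) : Decidable (Spec_selected_lanes api changed_files out) := by unfold Spec_selected_lanes; infer_instance

-- ===== CLAIM (what is proved, stated in full; the proofs are below) =====
def Claim_equal_selected_lanes : Prop := ∀ (api : List (String × Bool)) (changed_files : List String), Dom_selected_lanes api changed_files → Spec_selected_lanes api changed_files (selected_lanes api changed_files)

-- ===== LEMMAS AND PROOFS =====

/-- The classifying fold computes, component by component, an `any` over the files. -/
lemma pvAltStep_foldl (l : List String) (a b c d e : Bool) :
    l.foldl pvAltStep (a, b, c, d, e) =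
      ( a || l.any (fun p => PySem.Str.startswith p "docs/" || pvDocsNames.contains p),
        b || l.any (fun p => PySem.Str.startswith p "src/" || p == "architecture/source_rationale.yaml"),
        c || l.any (fun p => PySem.Str.startswith p "tests/" || ["architecture/test_topology.yaml", "pytest.ini"].contains p),
        d || l.any (fun p => PySem.Str.startswith p "scripts/" || p == "architecture/script_manifest.yaml"),
        e || l.any (fun p => pvDataNames.contains p) ) := by
  induction l generalizing a b c d e with
  | nil => simp
  | cons x xs ih =>
      simp [List.foldl_cons, List.any_cons, pvAltStep, ih, Bool.or_assoc]

/-- Boolean equality from the two-way implication. -/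
lemma bool_eq_of_iff {a b : Bool} (h : a = true ↔ b = true) : a = b := by
  cases a <;> cases b <;> simp_all

/-- `changed_files_touch` with a single pattern is a plain `any startswith`. -/
lemma touch_single (l : List String) (p : String) :
    changed_files_touch l [p] = l.any (fun x => PySem.Str.startswith x p) := by
  simp [changed_files_touch]

lemma any_or_split (l : List String) (p q : String → Bool) :
    (l.any p || l.any q) = l.any (fun x => p x || q x) := by
  apply bool_eq_of_iff
  simp only [Bool.or_eq_true, List.any_eq_true]
  constructor
  · rintro (⟨x, hx, h⟩ | ⟨x, hx, h⟩) <;> exact ⟨x, hx, by simp [h]⟩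
  · rintro ⟨x, hx, h | h⟩
    exacts [Or.inl ⟨x, hx, h⟩, Or.inr ⟨x, hx, h⟩]

lemma contains_as_any (l : List String) (s : String) :
    l.contains s = l.any (fun x => x == s) := by
  apply bool_eq_of_iff
  simp [List.any_eq_true]

-- ===== VERDICT (by name: the statement is the Claim_ definition above) =====
theorem selected_lanes_spec : Claim_equal_selected_lanes := by
  intro api changed_files _
  unfold Spec_selected_lanes selected_lanes selected_lanes_alt
  rw [pvAltStep_foldl]
  simp only [touch_single, contains_as_any, any_or_split, Bool.false_or, pvDocsNames,
    pvDataNames, List.any_nil, List.any_cons, Bool.or_false]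
  refine List.ext_getElem rfl ?_
  intro i hi _
  simp only [List.length_cons, List.length_nil] at hi
  interval_cases i <;> simp only [List.getElem_cons_zero, List.getElem_cons_succ] <;>
    refine Prod.ext rfl ?_ <;> apply bool_eq_of_iff <;>
    simp only [List.any_eq_true, Bool.or_eq_true, beq_iff_eq, PySem.Str.startswith_eq] <;>
    (constructor <;> rintro ⟨x, hx, h⟩ <;> refine ⟨x, hx, ?_⟩) <;>
    first
      | tauto
      | -- context_budget, A → B: the three extra names are subsumed by the docs condition
        (rcases h with h | rfl | rfl | rfl <;> first | tauto | decide)
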